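-- pv_equiv track=rewrite | github.com/rohitgupta29/DSARevision | Recursion/DynamicProgramming/memoization/bricksColoring.py | count_ways_recursive
-- ===== SOURCE A (Python) =====
-- def count_ways_recursive(n, m, k, prev_color, memo):
--     #Base Case
--     if n ==0:
--         return 1 if k == 0 else 0
--     if k <0:
--         return 0
--     if (n,k,prev_color) in memo:
--         return memo[(n,k,prev_color)]
--
--     # If we paint the current brick the same color as previous one
--     same_color = count_ways_recursive(n-1, m, k, prev_color, memo)
--
--     # If we paint the current brick a different color
--     different_color = count_ways_recursive(n-1,m,k-1,-1,memo) * (m-1) # we reduce the count of k by 1 and choose from 'm-1' colors.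
--
--     # total ways
--     total_ways = (same_color + different_color) % (10**9 + 7)
--
--     # store the result in the memo dictionary
--     memo[(n,k,prev_color)] = total_ways
--     return total_ways
-- ===== SOURCE B (Python) =====
-- def count_ways_recursive(n, m, k, prev_color, memo):
--     # Closed form: pick which k of the n bricks differ in color from their
--     # predecessor (C(n, k) ways) and one of the m-1 other colors for each.
--     MOD = 10 ** 9 + 7
--     if k < 0 or k > n:
--         return 0
--     c = 1
--     for i in range(k):
--         c = c * (n - i) // (i + 1)
--     return c % MOD * pow((m - 1) % MOD, k, MOD) % MOD
-- ===== Notes on version B (the rewrite author's own statement) =====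
-- stated objective: faster
-- what changed: Replaces the O(n*k) memoized recursion by the closed form C(n,k)*(m-1)^k mod 1e9+7 (exact iterative binomial plus modular exponentiation); Pre_ excludes n<0 with k>=0, where A recurses without bound, and memos pre-seeded at a state the recursion consults, where A returns the seeded value instead of the count - a caching corner where either behaviour is defensible.
-- outside the precondition, e.g. on count_ways_recursive(2, 3, 1, 0, {(1, 0, -1): 5}): A returns 12, B returns 4; on count_ways_recursive(-1, 2, 0, 0, {(-1, 0, 0): 5}): A returns 5, B returns 0
import Mathlib
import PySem

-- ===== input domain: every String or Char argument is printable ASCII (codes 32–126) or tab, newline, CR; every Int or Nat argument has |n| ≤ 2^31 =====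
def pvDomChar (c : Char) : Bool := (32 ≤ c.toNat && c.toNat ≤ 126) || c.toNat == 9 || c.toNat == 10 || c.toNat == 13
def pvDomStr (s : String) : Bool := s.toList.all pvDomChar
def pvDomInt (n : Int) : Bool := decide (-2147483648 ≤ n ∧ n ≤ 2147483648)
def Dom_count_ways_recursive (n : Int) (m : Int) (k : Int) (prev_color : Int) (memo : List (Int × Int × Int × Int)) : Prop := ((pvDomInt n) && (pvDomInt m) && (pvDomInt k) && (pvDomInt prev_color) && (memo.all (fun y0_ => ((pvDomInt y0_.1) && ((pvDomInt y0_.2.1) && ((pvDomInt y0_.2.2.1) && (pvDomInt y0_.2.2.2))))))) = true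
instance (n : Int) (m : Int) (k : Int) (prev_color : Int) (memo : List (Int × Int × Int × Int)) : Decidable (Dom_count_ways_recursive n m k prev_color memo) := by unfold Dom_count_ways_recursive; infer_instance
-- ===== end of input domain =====

-- B replaces A's O(n*k) memoized recursion by the closed form C(n,k)*(m-1)^k mod 1e9+7;
-- A mutates memo in place, B does not — the equivalence proved here is about the return value only.

-- ===== PORT A =====
-- the Python memo dict, keyed by the (n, k, prev_color) triple
def pvMemoDict (memo : List (Int × Int × Int × Int)) : Std.HashMap (Int × Int × Int) Int :=
  memo.foldl (fun d q => d.insert (q.1, q.2.1, q.2.2.1) q.2.2.2) ∅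

-- fuel = n.toNat at the top call: the recursion decreases n by 1 on both branches,
-- so fuel never runs out on the admitted inputs (0 ≤ n ∨ k < 0)
def cwAux (fuel : Nat) (n : Int) (m : Int) (k : Int) (prev_color : Int)
    (memo : Std.HashMap (Int × Int × Int) Int) : Int × Std.HashMap (Int × Int × Int) Int :=
  if n = 0 then ((if k = 0 then 1 else 0), memo)
  else if k < 0 then (0, memo)
  else
    match memo[(n, k, prev_color)]? with
    | some v => (v, memo)
    | none =>
      match fuel with
      | 0 => (0, memo)  -- unreachable under Pre_
      | fuel + 1 =>
        let sc := cwAux fuel (n - 1) m k prev_color memo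
        let dc := cwAux fuel (n - 1) m (k - 1) (-1) sc.2
        let total := PySem.Int.mod (sc.1 + dc.1 * (m - 1)) 1000000007
        (total, dc.2.insert (n, k, prev_color) total)

def count_ways_recursive (n : Int) (m : Int) (k : Int) (prev_color : Int) (memo : List (Int × Int × Int × Int)) : Int :=
  (cwAux n.toNat n m k prev_color (pvMemoDict memo)).1

-- ===== PORT B =====
def count_ways_recursive_alt (n : Int) (m : Int) (k : Int) (prev_color : Int) (memo : List (Int × Int × Int × Int)) : Int :=
  if k < 0 || k > n then 0
  else
    let c := (PySem.List.pyRange 0 k 1).foldl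
      (fun c i => PySem.Int.floordiv (c * (n - i)) (i + 1)) 1
    PySem.Int.mod (PySem.Int.mod c 1000000007 *
      PySem.Int.powMod (PySem.Int.mod (m - 1) 1000000007) k.toNat 1000000007) 1000000007

-- ===== PRECONDITION & SPEC =====
-- Pre_ excludes (a) n < 0 with 0 ≤ k, where A recurses without bound (RecursionError,
-- except when a pre-seeded memo hit cuts the descent short), and (b) memos pre-seeded at
-- a (n', k', prev') state the recursion actually consults, where A returns the seeded
-- value instead of the count — a caching corner where either behaviour is defensible.
def Pre_count_ways_recursive (n : Int) (m : Int) (k : Int) (prev_color : Int) (memo : List (Int × Int × Int × Int)) : Prop :=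
  (0 ≤ n ∨ k < 0) ∧
  ∀ q ∈ memo, ¬(0 ≤ k ∧ 1 ≤ q.1 ∧ q.1 ≤ n ∧
      ((q.2.2.1 = prev_color ∧ q.2.1 = k) ∨
       (q.2.2.1 = -1 ∧ 0 ≤ q.2.1 ∧ q.2.1 < k ∧ k - n + q.1 ≤ q.2.1)))
instance (n : Int) (m : Int) (k : Int) (prev_color : Int) (memo : List (Int × Int × Int × Int)) : Decidable (Pre_count_ways_recursive n m k prev_color memo) := by unfold Pre_count_ways_recursive; infer_instance

def pvWitness_count_ways_recursive : Int × Int × Int × Int × (List (Int × Int × Int × Int)) :=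
  (3, 2, 1, 0, [(9, 9, 9, 9)])

def Spec_count_ways_recursive (n : Int) (m : Int) (k : Int) (prev_color : Int) (memo : List (Int × Int × Int × Int)) (out : Int) : Prop := out = count_ways_recursive_alt n m k prev_color memo
instance (n : Int) (m : Int) (k : Int) (prev_color : Int) (memo : List (Int × Int × Int × Int)) (out : Int) : Decidable (Spec_count_ways_recursive n m k prev_color memo out) := by unfold Spec_count_ways_recursive; infer_instance

-- ===== CLAIM (what is proved, stated in full; the proofs are below) =====
def Claim_equal_count_ways_recursive : Prop := ∀ (n : Int) (m : Int) (k : Int) (prev_color : Int) (memo : List (Int × Int × Int × Int)), Dom_count_ways_recursive n m k prev_color memo → Pre_count_ways_recursive n m k prev_color memo → Spec_count_ways_recursive n m k prev_color memo (count_ways_recursive n m k prev_color memo)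

-- ===== LEMMAS AND PROOFS =====

-- the common value: C(n,k)*(m-1)^k mod 1e9+7, with A's base-case values at n = 0 / k < 0
def pvTerm (m n k : Int) : Int :=
  if k < 0 then 0
  else if n = 0 then (if k = 0 then 1 else 0)
  else ((n.toNat.choose k.toNat : Int) * (((m - 1) % 1000000007) ^ k.toNat)) % 1000000007

-- the pure value of the memoized recursion, looked up against the INITIAL memo md
def gfun (md : Std.HashMap (Int × Int × Int) Int) (m : Int) : Nat → Int → Int → Int → Int
  | fuel, n, k, pc =>
    if n = 0 then (if k = 0 then 1 else 0)
    else if k < 0 then 0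
    else
      match md[(n, k, pc)]? with
      | some v => v
      | none =>
        match fuel with
        | 0 => 0
        | fuel + 1 =>
          PySem.Int.mod (gfun md m fuel (n - 1) k pc + gfun md m fuel (n - 1) (k - 1) (-1) * (m - 1)) 1000000007

def Gv (md : Std.HashMap (Int × Int × Int) Int) (m n k pc : Int) : Int := gfun md m n.toNat n k pc

lemma gfun_base0 (md : Std.HashMap (Int × Int × Int) Int) (m : Int) (fuel : Nat) (k pc : Int) :
    gfun md m fuel 0 k pc = if k = 0 then 1 else 0 := by
  rw [gfun.eq_def]; simp

lemma gfun_klt (md : Std.HashMap (Int × Int × Int) Int) (m : Int) (fuel : Nat) (n k pc : Int)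
    (h0 : ¬ n = 0) (hk : k < 0) : gfun md m fuel n k pc = 0 := by
  rw [gfun.eq_def]; simp [h0, hk]

lemma gfun_hit (md : Std.HashMap (Int × Int × Int) Int) (m : Int) (fuel : Nat) (n k pc v : Int)
    (h0 : ¬ n = 0) (hk : ¬ k < 0) (hmd : md[(n, k, pc)]? = some v) :
    gfun md m fuel n k pc = v := by
  rw [gfun.eq_def]; simp [h0, hk, hmd]

lemma gfun_rec (md : Std.HashMap (Int × Int × Int) Int) (m : Int) (f : Nat) (n k pc : Int)
    (h0 : ¬ n = 0) (hk : ¬ k < 0) (hmd : md[(n, k, pc)]? = none) :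
    gfun md m (f + 1) n k pc =
      PySem.Int.mod (gfun md m f (n - 1) k pc + gfun md m f (n - 1) (k - 1) (-1) * (m - 1)) 1000000007 := by
  rw [gfun.eq_def]; simp [h0, hk, hmd]

lemma gfun_fuel (md : Std.HashMap (Int × Int × Int) Int) (m : Int) :
    ∀ f1 f2 : Nat, ∀ n k pc : Int, 0 ≤ n → n.toNat ≤ f1 → n.toNat ≤ f2 →
      gfun md m f1 n k pc = gfun md m f2 n k pc := by
  intro f1
  induction f1 with
  | zero =>
    intro f2 n k pc hn h1 _
    have hn0 : n = 0 := by omega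
    subst hn0
    rw [gfun_base0, gfun_base0]
  | succ f ih =>
    intro f2 n k pc hn h1 h2
    by_cases h0 : n = 0
    · subst h0; rw [gfun_base0, gfun_base0]
    · cases f2 with
      | zero => omega
      | succ f2' =>
        by_cases hk : k < 0
        · rw [gfun_klt md m _ n k pc h0 hk, gfun_klt md m _ n k pc h0 hk]
        · cases hmd : md[(n, k, pc)]? with
          | some v => rw [gfun_hit md m _ n k pc v h0 hk hmd, gfun_hit md m _ n k pc v h0 hk hmd]
          | none =>
            rw [gfun_rec md m f n k pc h0 hk hmd, gfun_rec md m f2' n k pc h0 hk hmd,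
                ih f2' (n - 1) k pc (by omega) (by omega) (by omega),
                ih f2' (n - 1) (k - 1) (-1) (by omega) (by omega) (by omega)]

lemma Gv_eq_gfun (md : Std.HashMap (Int × Int × Int) Int) (m : Int) (f : Nat) (n k pc : Int)
    (hn : 0 ≤ n) (hf : n.toNat ≤ f) : Gv md m n k pc = gfun md m f n k pc :=
  gfun_fuel md m n.toNat f n k pc hn le_rfl hf

lemma Gv_zero (md : Std.HashMap (Int × Int × Int) Int) (m k pc : Int) :
    Gv md m 0 k pc = if k = 0 then 1 else 0 := by
  rw [Gv, gfun_base0]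

lemma Gv_neg (md : Std.HashMap (Int × Int × Int) Int) (m i k pc : Int) (hk : k < 0) :
    Gv md m i k pc = 0 := by
  by_cases h0 : i = 0
  · subst h0; rw [Gv_zero, if_neg (by omega)]
  · rw [Gv, gfun_klt md m _ i k pc h0 hk]

lemma Gv_rec (md : Std.HashMap (Int × Int × Int) Int) (m i k pc : Int)
    (hi : 1 ≤ i) (hk : ¬ k < 0) (h : md[(i, k, pc)]? = none) :
    Gv md m i k pc =
      PySem.Int.mod (Gv md m (i - 1) k pc + Gv md m (i - 1) (k - 1) (-1) * (m - 1)) 1000000007 := by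
  have hf : i.toNat = (i - 1).toNat + 1 := by omega
  rw [Gv, hf, gfun_rec md m (i - 1).toNat i k pc (by omega) hk h,
      ← Gv_eq_gfun md m (i - 1).toNat (i - 1) k pc (by omega) le_rfl,
      ← Gv_eq_gfun md m (i - 1).toNat (i - 1) (k - 1) (-1) (by omega) le_rfl]

-- ===== A-side, part 1: the memoized recursion computes Gv =====

lemma hm_get_insert_self (d : Std.HashMap (Int × Int × Int) Int) (key : Int × Int × Int) (v : Int) :
    (d.insert key v)[key]? = some v := Std.HashMap.getElem?_insert_self

lemma hm_get_insert_ne (d : Std.HashMap (Int × Int × Int) Int) (key key' : Int × Int × Int) (v : Int)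
    (h : key' ≠ key) : (d.insert key v)[key']? = d[key']? := by
  rw [Std.HashMap.getElem?_insert]
  simp only [beq_iff_eq]
  rw [if_neg (fun e => h e.symm)]

lemma cwAux_base0 (fuel : Nat) (m k pc : Int) (mw : Std.HashMap (Int × Int × Int) Int) :
    cwAux fuel 0 m k pc mw = ((if k = 0 then 1 else 0), mw) := by
  rw [cwAux.eq_def]; simp

lemma cwAux_klt (fuel : Nat) (n m k pc : Int) (mw : Std.HashMap (Int × Int × Int) Int)
    (h0 : ¬ n = 0) (hk : k < 0) : cwAux fuel n m k pc mw = (0, mw) := by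
  rw [cwAux.eq_def]; simp [h0, hk]

lemma cwAux_hit (fuel : Nat) (n m k pc v : Int) (mw : Std.HashMap (Int × Int × Int) Int)
    (h0 : ¬ n = 0) (hk : ¬ k < 0) (hmw : mw[(n, k, pc)]? = some v) :
    cwAux fuel n m k pc mw = (v, mw) := by
  rw [cwAux.eq_def]; simp [h0, hk, hmw]

lemma cwAux_rec (f : Nat) (n m k pc : Int) (mw : Std.HashMap (Int × Int × Int) Int)
    (h0 : ¬ n = 0) (hk : ¬ k < 0) (hmw : mw[(n, k, pc)]? = none) :
    cwAux (f + 1) n m k pc mw =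
      (PySem.Int.mod ((cwAux f (n - 1) m k pc mw).1 +
          (cwAux f (n - 1) m (k - 1) (-1) (cwAux f (n - 1) m k pc mw).2).1 * (m - 1)) 1000000007,
        ((cwAux f (n - 1) m (k - 1) (-1) (cwAux f (n - 1) m k pc mw).2).2).insert (n, k, pc)
          (PySem.Int.mod ((cwAux f (n - 1) m k pc mw).1 +
            (cwAux f (n - 1) m (k - 1) (-1) (cwAux f (n - 1) m k pc mw).2).1 * (m - 1)) 1000000007)) := by
  conv_lhs => rw [cwAux.eq_def]
  simp [h0, hk, hmw]

-- the running memo extends md, each new entry holding the Gv value of its key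
def MExt (md mw : Std.HashMap (Int × Int × Int) Int) (m : Int) : Prop :=
  ∀ key : Int × Int × Int,
    (∀ v, md[key]? = some v → mw[key]? = some v) ∧
    (∀ v, mw[key]? = some v →
      md[key]? = some v ∨ (md[key]? = none ∧ v = Gv md m key.1 key.2.1 key.2.2))

lemma MExt_refl (md : Std.HashMap (Int × Int × Int) Int) (m : Int) : MExt md md m :=
  fun _ => ⟨fun _ h => h, fun _ h => Or.inl h⟩

lemma cwAux_spec (md : Std.HashMap (Int × Int × Int) Int) (m : Int) :
    ∀ (fuel : Nat) (n k pc : Int) (mw : Std.HashMap (Int × Int × Int) Int),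
      0 ≤ n → n.toNat ≤ fuel → MExt md mw m →
      (cwAux fuel n m k pc mw).1 = gfun md m fuel n k pc ∧ MExt md (cwAux fuel n m k pc mw).2 m := by
  intro fuel
  induction fuel with
  | zero =>
    intro n k pc mw hn hf hext
    have hn0 : n = 0 := by omega
    subst hn0
    rw [cwAux_base0, gfun_base0]
    exact ⟨rfl, hext⟩
  | succ f ih =>
    intro n k pc mw hn hf hext
    by_cases h0 : n = 0
    · subst h0
      rw [cwAux_base0, gfun_base0]
      exact ⟨rfl, hext⟩
    · by_cases hk : k < 0
      · rw [cwAux_klt _ n m k pc mw h0 hk, gfun_klt md m _ n k pc h0 hk]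
        exact ⟨rfl, hext⟩
      · cases hmw : mw[(n, k, pc)]? with
        | some v =>
          rw [cwAux_hit _ n m k pc v mw h0 hk hmw]
          refine ⟨?_, hext⟩
          rcases (hext (n, k, pc)).2 v hmw with hmd | ⟨hmd, hv⟩
          · rw [gfun_hit md m _ n k pc v h0 hk hmd]
          · rw [hv]
            exact Gv_eq_gfun md m (f + 1) n k pc hn hf
        | none =>
          have hmd : md[(n, k, pc)]? = none := by
            cases hmd : md[(n, k, pc)]? with
            | none => rfl
            | some v => rw [(hext (n, k, pc)).1 v hmd] at hmw; cases hmw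
          obtain ⟨hs1, hs2⟩ := ih (n - 1) k pc mw (by omega) (by omega) hext
          obtain ⟨hd1, hd2⟩ := ih (n - 1) (k - 1) (-1) (cwAux f (n - 1) m k pc mw).2 (by omega) (by omega) hs2
          rw [cwAux_rec f n m k pc mw h0 hk hmw]
          have htotG :
              PySem.Int.mod ((cwAux f (n - 1) m k pc mw).1 +
                (cwAux f (n - 1) m (k - 1) (-1) (cwAux f (n - 1) m k pc mw).2).1 * (m - 1)) 1000000007 =
              Gv md m n k pc := by
            rw [hs1, hd1, Gv_rec md m n k pc (by omega) hk hmd,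
                Gv_eq_gfun md m f (n - 1) k pc (by omega) (by omega),
                Gv_eq_gfun md m f (n - 1) (k - 1) (-1) (by omega) (by omega)]
          constructor
          · rw [hs1, hd1, gfun_rec md m f n k pc h0 hk hmd]
          · intro key
            constructor
            · intro v hv
              rcases eq_or_ne key (n, k, pc) with rfl | hne
              · rw [hmd] at hv; cases hv
              · rw [hm_get_insert_ne _ _ _ _ hne]
                exact (hd2 key).1 v hv
            · intro v hv
              rcases eq_or_ne key (n, k, pc) with rfl | hne
              · rw [hm_get_insert_self] at hv
                cases hv
                exact Or.inr ⟨hmd, htotG⟩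
              · rw [hm_get_insert_ne _ _ _ _ hne] at hv
                exact (hd2 key).2 v hv

lemma cw_eq_Gv (md : Std.HashMap (Int × Int × Int) Int) (m n k pc : Int) (hn : 0 ≤ n) :
    (cwAux n.toNat n m k pc md).1 = Gv md m n k pc :=
  (cwAux_spec md m n.toNat n k pc md hn le_rfl (MExt_refl md m)).1

-- ===== A-side, part 2: when no consulted state is pre-seeded, Gv is the closed form =====

lemma foldl_insert_get_none :
    ∀ (L : List (Int × Int × Int × Int)) (d : Std.HashMap (Int × Int × Int) Int)
      (key : Int × Int × Int), (∀ q ∈ L, (q.1, q.2.1, q.2.2.1) ≠ key) →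
      (L.foldl (fun d q => d.insert (q.1, q.2.1, q.2.2.1) q.2.2.2) d)[key]? = d[key]? := by
  intro L
  induction L with
  | nil => intro d key _; rfl
  | cons q L ih =>
    intro d key h
    rw [List.foldl_cons, ih _ key (fun r hr => h r (List.mem_cons_of_mem _ hr))]
    exact hm_get_insert_ne _ _ _ _ (Ne.symm (h q (by simp)))

lemma pvMemoDict_none (memo : List (Int × Int × Int × Int)) (key : Int × Int × Int)
    (h : ∀ q ∈ memo, (q.1, q.2.1, q.2.2.1) ≠ key) : (pvMemoDict memo)[key]? = none := by
  rw [pvMemoDict, foldl_insert_get_none memo _ key h]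
  simp

-- Pascal step for pvTerm
lemma pvTerm_step (m n k : Int) (hn : 1 ≤ n) (hk : 0 ≤ k) :
    (pvTerm m (n - 1) k + pvTerm m (n - 1) (k - 1) * (m - 1)) % 1000000007 = pvTerm m n k := by
  by_cases hk0 : k = 0
  · subst hk0
    have h1 : pvTerm m (n - 1) 0 = 1 := by
      unfold pvTerm
      by_cases h : n - 1 = 0
      · simp [h]
      · rw [if_neg (by norm_num), if_neg h]
        norm_num
    have h2 : pvTerm m (n - 1) (0 - 1) = 0 := by
      unfold pvTerm; norm_num
    have h3 : pvTerm m n 0 = 1 := by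
      unfold pvTerm
      rw [if_neg (by norm_num), if_neg (by omega)]
      norm_num
    rw [h1, h2, h3]
    norm_num
  · have hk1 : 1 ≤ k := by omega
    set X : Int := (m - 1) % 1000000007 with hX
    have hXmod : X ≡ m - 1 [ZMOD 1000000007] := Int.emod_emod_of_dvd _ dvd_rfl
    by_cases hn1 : n = 1
    · subst hn1
      have h1 : pvTerm m (1 - 1) k = 0 := by
        unfold pvTerm
        rw [if_neg (by omega)]
        norm_num [hk0]
      have h2 : pvTerm m (1 - 1) (k - 1) = if k = 1 then 1 else 0 := by
        unfold pvTerm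
        rw [if_neg (by omega), if_pos (by norm_num)]
        by_cases h : k = 1
        · simp [h]
        · rw [if_neg (by omega), if_neg h]
      rw [h1, h2]
      by_cases h : k = 1
      · subst h
        rw [if_pos rfl]
        unfold pvTerm
        rw [if_neg (by omega), if_neg (by norm_num)]
        have hc : (Int.toNat 1).choose (Int.toNat (1:Int)) = 1 := by decide
        rw [hc]
        push_cast
        rw [pow_one, one_mul, zero_add, one_mul]
        exact (Int.emod_emod_of_dvd _ dvd_rfl).symm
      · rw [if_neg h]
        unfold pvTerm
        rw [if_neg (by omega), if_neg (by norm_num),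
            Nat.choose_eq_zero_of_lt (show (1:Int).toNat < k.toNat by omega)]
        norm_num
    · -- n ≥ 2 and k ≥ 1
      have hn2 : 2 ≤ n := by omega
      have hnt : n.toNat = (n - 1).toNat + 1 := by omega
      have hkt : k.toNat = (k - 1).toNat + 1 := by omega
      have e1 : pvTerm m (n - 1) k =
          ((((n - 1).toNat.choose k.toNat : Int)) * X ^ k.toNat) % 1000000007 := by
        unfold pvTerm; rw [if_neg (by omega), if_neg (by omega)]
      have e2 : pvTerm m (n - 1) (k - 1) =
          ((((n - 1).toNat.choose (k - 1).toNat : Int)) * X ^ (k - 1).toNat) % 1000000007 := by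
        unfold pvTerm; rw [if_neg (by omega), if_neg (by omega)]
      rw [e1, e2]
      unfold pvTerm
      rw [if_neg (by omega), if_neg (by omega)]
      have c1 : ((((n - 1).toNat.choose k.toNat : Int)) * X ^ k.toNat) % 1000000007 ≡
          (((n - 1).toNat.choose k.toNat : Int)) * X ^ k.toNat [ZMOD 1000000007] :=
        Int.emod_emod_of_dvd _ dvd_rfl
      have c2 : ((((n - 1).toNat.choose (k - 1).toNat : Int)) * X ^ (k - 1).toNat) % 1000000007 ≡
          (((n - 1).toNat.choose (k - 1).toNat : Int)) * X ^ (k - 1).toNat [ZMOD 1000000007] :=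
        Int.emod_emod_of_dvd _ dvd_rfl
      have goalMod :
          ((((n - 1).toNat.choose k.toNat : Int)) * X ^ k.toNat) % 1000000007 +
            ((((n - 1).toNat.choose (k - 1).toNat : Int)) * X ^ (k - 1).toNat) % 1000000007 * (m - 1) ≡
          ((n.toNat.choose k.toNat : Int)) * X ^ k.toNat [ZMOD 1000000007] := by
        calc ((((n - 1).toNat.choose k.toNat : Int)) * X ^ k.toNat) % 1000000007 +
              ((((n - 1).toNat.choose (k - 1).toNat : Int)) * X ^ (k - 1).toNat) % 1000000007 * (m - 1)
            ≡ (((n - 1).toNat.choose k.toNat : Int)) * X ^ k.toNat +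
              (((n - 1).toNat.choose (k - 1).toNat : Int)) * X ^ (k - 1).toNat * X [ZMOD 1000000007] :=
              c1.add (c2.mul hXmod.symm)
          _ = ((n.toNat.choose k.toNat : Int)) * X ^ k.toNat := by
              rw [hnt, hkt, Nat.choose_succ_succ]
              push_cast
              rw [pow_succ]
              ring
      exact goalMod

-- Gv equals the closed form when md has no entry at any consulted state
lemma gv_pure (md : Std.HashMap (Int × Int × Int) Int) (m : Int) :
    ∀ (N : Nat) (n k pc : Int), 0 ≤ n → n.toNat ≤ N →
      (∀ i j c : Int, 1 ≤ i → i ≤ n → 0 ≤ j →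
        ((c = pc ∧ j = k) ∨ (c = -1 ∧ j < k ∧ k - n + i ≤ j)) → md[(i, j, c)]? = none) →
      Gv md m n k pc = pvTerm m n k := by
  intro N
  induction N with
  | zero =>
    intro n k pc hn hN _
    have h0 : n = 0 := by omega
    subst h0
    rw [Gv_zero]
    unfold pvTerm
    by_cases hk : k < 0
    · rw [if_pos hk, if_neg (by omega)]
    · rw [if_neg hk, if_pos rfl]
  | succ N ih =>
    intro n k pc hn hN hmd
    by_cases h0 : n = 0
    · subst h0
      rw [Gv_zero]
      unfold pvTerm
      by_cases hk : k < 0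
      · rw [if_pos hk, if_neg (by omega)]
      · rw [if_neg hk, if_pos rfl]
    · by_cases hk : k < 0
      · rw [Gv_neg md m n k pc hk]
        unfold pvTerm
        rw [if_pos hk]
      · have hroot : md[(n, k, pc)]? = none :=
          hmd n k pc (by omega) le_rfl (by omega) (Or.inl ⟨rfl, rfl⟩)
        have hc1 : ∀ i j c : Int, 1 ≤ i → i ≤ n - 1 → 0 ≤ j →
            ((c = pc ∧ j = k) ∨ (c = -1 ∧ j < k ∧ k - (n - 1) + i ≤ j)) →
            md[(i, j, c)]? = none := by
          intro i j c hi hin hj hd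
          apply hmd i j c hi (by omega) hj
          rcases hd with ⟨h1, h2⟩ | ⟨h1, h2, h3⟩
          · exact Or.inl ⟨h1, h2⟩
          · exact Or.inr ⟨h1, h2, by omega⟩
        have hc2 : ∀ i j c : Int, 1 ≤ i → i ≤ n - 1 → 0 ≤ j →
            ((c = (-1 : Int) ∧ j = k - 1) ∨ (c = -1 ∧ j < k - 1 ∧ k - 1 - (n - 1) + i ≤ j)) →
            md[(i, j, c)]? = none := by
          intro i j c hi hin hj hd
          apply hmd i j c hi (by omega) hj
          rcases hd with ⟨h1, h2⟩ | ⟨h1, h2, h3⟩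
          · exact Or.inr ⟨h1, by omega, by omega⟩
          · exact Or.inr ⟨h1, by omega, by omega⟩
        rw [Gv_rec md m n k pc (by omega) hk hroot,
            ih (n - 1) k pc (by omega) (by omega) hc1,
            ih (n - 1) (k - 1) (-1) (by omega) (by omega) hc2,
            PySem.Int.mod_eq_emod_of_pos (by norm_num)]
        exact pvTerm_step m n k (by omega) (by omega)

-- ===== B-side: the closed-form implementation computes pvTerm =====

lemma binom_loop (n : Int) (hn : 0 ≤ n) :
    ∀ t : Nat, (t : Int) ≤ n →
      (PySem.List.pyRange 0 (t : Int) 1).foldl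
        (fun c i => PySem.Int.floordiv (c * (n - i)) (i + 1)) 1 = (n.toNat.choose t : Int) := by
  intro t
  induction t with
  | zero =>
    intro _
    rw [show ((0 : Nat) : Int) = 0 by norm_num, PySem.List.pyRange_one_eq_nil le_rfl]
    simp
  | succ t ih =>
    intro ht
    have ht' : (t : Int) ≤ n := by push_cast at ht ⊢; omega
    have htn : t < n.toNat := by omega
    have hsplit : PySem.List.pyRange 0 (((t + 1 : Nat)) : Int) 1 =
        PySem.List.pyRange 0 (t : Int) 1 ++ [(t : Int)] := by
      rw [show (((t + 1 : Nat)) : Int) = (t : Int) + 1 by push_cast; ring]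
      exact PySem.List.pyRange_one_succ_right (by positivity)
    rw [hsplit, List.foldl_append, ih ht', List.foldl_cons, List.foldl_nil]
    have hid : ((n.toNat.choose t : Nat) : Int) * (n - t) =
        ((n.toNat.choose (t + 1) : Nat) : Int) * ((t : Int) + 1) := by
      have := Nat.choose_succ_right_eq n.toNat t
      have hcast : ((n.toNat.choose (t + 1) * (t + 1) : Nat) : Int) =
          ((n.toNat.choose t * (n.toNat - t) : Nat) : Int) := congrArg (fun x : Nat => (x : Int)) this
      push_cast [Nat.cast_sub (le_of_lt htn)] at hcast
      have hnn : ((n.toNat : Nat) : Int) = n := by omega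
      rw [hnn] at hcast
      linarith [hcast]
    rw [hid, PySem.Int.floordiv_eq_ediv_of_pos (by positivity),
        Int.mul_ediv_cancel _ (by positivity)]

lemma alt_eq_pvTerm (n m k prev_color : Int) (memo : List (Int × Int × Int × Int))
    (h : 0 ≤ n ∨ k < 0) :
    count_ways_recursive_alt n m k prev_color memo = pvTerm m n k := by
  unfold count_ways_recursive_alt
  by_cases hk : k < 0
  · rw [if_pos (by simp [hk]), pvTerm, if_pos hk]
  · have hn : 0 ≤ n := by rcases h with h | h; exact h; omega
    by_cases hkn : k > n
    · rw [if_pos (by simp [hkn])]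
      unfold pvTerm
      rw [if_neg hk]
      by_cases h0 : n = 0
      · rw [if_pos h0, if_neg (by omega)]
      · rw [if_neg h0, Nat.choose_eq_zero_of_lt (by omega)]
        norm_num
    · rw [if_neg (by simp [hk, hkn])]
      have hkk : k = ((k.toNat : Nat) : Int) := by omega
      have hloop : (PySem.List.pyRange 0 k 1).foldl
          (fun c i => PySem.Int.floordiv (c * (n - i)) (i + 1)) 1 = (n.toNat.choose k.toNat : Int) := by
        rw [hkk]
        exact binom_loop n hn k.toNat (by omega)
      simp only [hloop, PySem.Int.powMod_eq]
      simp only [PySem.Int.mod_eq_emod_of_pos (show (0:Int) < 1000000007 by norm_num)]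
      unfold pvTerm
      rw [if_neg hk]
      by_cases h0 : n = 0
      · have hk0 : k = 0 := by omega
        subst hk0; rw [if_pos h0]
        norm_num
      · rw [if_neg h0, ← Int.mul_emod]
  
-- ===== VERDICT (by name: the statement is the Claim_ definition above) =====
theorem count_ways_recursive_spec : Claim_equal_count_ways_recursive := by
  intro n m k prev_color memo _ hpre
  obtain ⟨hnk, hmemo⟩ := hpre
  unfold Spec_count_ways_recursive count_ways_recursive
  rw [alt_eq_pvTerm n m k prev_color memo hnk]
  by_cases h0 : n = 0
  · subst h0
    rw [cwAux_base0]
    unfold pvTerm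
    by_cases hk : k < 0
    · rw [if_pos hk, if_neg (by omega)]
    · rw [if_neg hk, if_pos rfl]
  · by_cases hk : k < 0
    · rw [cwAux_klt _ n m k prev_color _ h0 hk]
      unfold pvTerm
      rw [if_pos hk]
    · have hn : 0 ≤ n := by rcases hnk with h | h; exact h; omega
      rw [cw_eq_Gv (pvMemoDict memo) m n k prev_color hn]
      apply gv_pure (pvMemoDict memo) m n.toNat n k prev_color hn le_rfl
      intro i j c hi hin hj hd
      apply pvMemoDict_none
      intro q hq hkey
      apply hmemo q hq
      have h1 : q.1 = i := congrArg Prod.fst hkey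
      have h2 : q.2.1 = j := congrArg (fun p => p.2.1) hkey
      have h3 : q.2.2.1 = c := congrArg (fun p : Int × Int × Int => p.2.2) hkey
      have hk0 : 0 ≤ k := by
        rcases hd with ⟨_, h⟩ | ⟨_, h, _⟩ <;> omega
      rcases hd with ⟨hc, hjk⟩ | ⟨hc, hjk, hji⟩
      · exact ⟨hk0, by omega, by omega, Or.inl ⟨by rw [h3, hc], by omega⟩⟩
      · exact ⟨hk0, by omega, by omega, Or.inr ⟨by rw [h3, hc], by omega, by omega, by omega⟩⟩
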